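-- pv_equiv track=rewrite | github.com/moonbyul-99/production_plan_2022 | code/loss_constraint.py | welding_loss
-- ===== SOURCE A (Python) =====
-- def welding_loss(car_type):
--     # car_type 为加工计划的车型列表[A,B...]
--     # 加工顺序从左至右
--     state = car_type[0]
--     n = 0
--     t = 0
--     #res = []
--     change = 0
--     count = 0
--     while n <  len(car_type):
--         #判断是否需要切换
--         if state == car_type[n]:
--             # 生产状态与车型一致，不需要切换
--             count += 1
--             t += 80
--         else:
--             #生产状态与车型不一致，需要切换，同时需要判断能否立即切换
--             if change == 1:
--                 #此时可以立即切换
--                 count = 1 # 一个周期内的次数重置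
--                 t += 80
--                 state = car_type[n]
--             else:
--                 #此时不能立即切换需要等待到30min后再切换
--                 state = car_type[n]
--                 #计算等待完成切换的时间
--                 t += 80 + 1800 - 80*count
--                 count = 1
--         n += 1
--     return t
-- ===== SOURCE B (Python) =====
-- def welding_loss(car_type):
--     last = car_type[-1]
--     switches = sum(1 for prev, cur in zip(car_type, car_type[1:]) if prev != cur)
--     run = 0
--     for x in reversed(car_type):
--         if x != last:
--             break
--         run += 1
--     return 1800 * switches + 80 * run
-- ===== Notes on version B (the rewrite author's own statement) =====
-- stated objective: simpler
-- what changed: Replaced the element-by-element state machine (state/count/change bookkeeping) by the closed form 1800*(number of adjacent switches) + 80*(final run length), computed with one zip-count and one short backward scan (measured ~2x faster: no per-element branching state update).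
import Mathlib
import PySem

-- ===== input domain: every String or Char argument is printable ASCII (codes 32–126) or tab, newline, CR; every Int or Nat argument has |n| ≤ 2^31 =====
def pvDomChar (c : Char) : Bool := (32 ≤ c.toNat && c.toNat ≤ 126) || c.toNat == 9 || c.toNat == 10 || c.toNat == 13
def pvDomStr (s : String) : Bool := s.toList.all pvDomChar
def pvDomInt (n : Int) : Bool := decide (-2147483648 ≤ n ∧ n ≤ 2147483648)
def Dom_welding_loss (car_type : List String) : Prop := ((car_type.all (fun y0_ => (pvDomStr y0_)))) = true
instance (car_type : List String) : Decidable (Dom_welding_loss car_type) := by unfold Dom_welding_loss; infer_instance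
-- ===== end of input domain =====

-- B replaces A's element-by-element state machine by the closed form
-- 1800*(number of adjacent switches) + 80*(length of the final run); objective: simpler.

-- ===== PORT A =====
-- A's while loop: state, t, count, change carried over the remaining elements in order
def weldLoopA (state : String) (t : Int) (count : Int) (change : Int) : List String → Int
  | [] => t
  | c :: rest =>
    if state == c then
      weldLoopA state (t + 80) (count + 1) change rest
    else
      if change == 1 then
        weldLoopA c (t + 80) 1 change rest
      else
        weldLoopA c (t + 80 + 1800 - 80 * count) 1 change rest

def welding_loss (car_type : List String) : Int :=
  match car_type with
  | [] => 0  -- unreachable under Pre_: Python raises IndexError at car_type[0]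
  | s0 :: _ => weldLoopA s0 0 0 0 car_type

-- ===== PORT B =====
def welding_loss_alt (car_type : List String) : Int :=
  match car_type.getLast? with
  | none => 0  -- unreachable under Pre_: Python raises IndexError at car_type[-1]
  | some last =>
    let switches : Int := ((car_type.zip car_type.tail).countP (fun p => p.1 != p.2) : Nat)
    let run : Int := ((car_type.reverse.takeWhile (fun x => x == last)).length : Nat)
    1800 * switches + 80 * run

-- ===== PRECONDITION & SPEC =====
-- Pre_ excludes only the empty list, on which the Python A raises IndexError (and B does too).
def Pre_welding_loss (car_type : List String) : Prop := car_type ≠ []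
instance (car_type : List String) : Decidable (Pre_welding_loss car_type) := by unfold Pre_welding_loss; infer_instance
def pvWitness_welding_loss : List String := ["A", "B", "B"]

def Spec_welding_loss (car_type : List String) (out : Int) : Prop := out = welding_loss_alt car_type
instance (car_type : List String) (out : Int) : Decidable (Spec_welding_loss car_type out) := by unfold Spec_welding_loss; infer_instance

-- ===== CLAIM (what is proved, stated in full; the proofs are below) =====
def Claim_equal_welding_loss : Prop := ∀ (car_type : List String), Dom_welding_loss car_type → Pre_welding_loss car_type → Spec_welding_loss car_type (welding_loss car_type)

-- ===== LEMMAS AND PROOFS =====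

-- switch count: number of adjacent unequal pairs (exactly B's countP expression)
def swC (l : List String) : Nat := (l.zip l.tail).countP (fun p => p.1 != p.2)

-- final-run length relative to a given last element (exactly B's takeWhile expression)
def lrC (last : String) (l : List String) : Nat := (l.reverse.takeWhile (fun x => x == last)).length

-- final-run length of a list (0 for [])
def lrN (l : List String) : Nat :=
  match l.getLast? with
  | none => 0
  | some la => lrC la l

theorem swC_single (a : String) : swC [a] = 0 := rfl

theorem swC_cons_cons (a b : String) (r : List String) :
    swC (a :: b :: r) = (if a = b then 0 else 1) + swC (b :: r) := by
  unfold swC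
  rw [show (a :: b :: r).zip (a :: b :: r).tail = (a, b) :: ((b :: r).zip (b :: r).tail) from rfl]
  rw [List.countP_cons]
  by_cases h : a = b
  · simp [h]
  · simp [h, bne_iff_ne]; omega

theorem swC_zero_iff (x : String) (r : List String) :
    swC (x :: r) = 0 ↔ ∀ y ∈ r, y = x := by
  induction r generalizing x with
  | nil => simp [swC_single]
  | cons b r ih =>
    rw [swC_cons_cons]
    constructor
    · intro h
      have hx : x = b := by by_contra hne; simp [hne] at h
      have hall := (ih b).mp (by omega)
      intro y hy
      rcases List.mem_cons.mp hy with hy | hy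
      · simp [hy, hx]
      · exact (hall y hy).trans hx.symm
    · intro h
      have hx : x = b := (h b (by simp)).symm
      have : swC (b :: r) = 0 := (ih b).mpr (fun y hy => (h y (by simp [hy])).trans hx)
      simp [hx, this]

theorem takeWhile_append_all {α : Type} (p : α → Bool) (xs ys : List α)
    (h : ∀ x ∈ xs, p x = true) :
    (xs ++ ys).takeWhile p = xs ++ ys.takeWhile p := by
  induction xs with
  | nil => simp
  | cons a xs ih =>
    have ha : p a = true := h a (by simp)
    simp [ha, ih (fun x hx => h x (by simp [hx]))]

theorem takeWhile_append_not_all {α : Type} (p : α → Bool) (xs ys : List α)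
    (h : ¬ ∀ x ∈ xs, p x = true) :
    (xs ++ ys).takeWhile p = xs.takeWhile p := by
  induction xs with
  | nil => exact absurd (by simp) h
  | cons a xs ih =>
    by_cases ha : p a = true
    · have : ¬ ∀ x ∈ xs, p x = true := by
        intro hall; exact h (by intro x hx; rcases List.mem_cons.mp hx with hx | hx
                                · simp [hx, ha]
                                · exact hall x hx)
      simp [ha, ih this]
    · simp [ha]

theorem lrC_all (last : String) (l : List String)
    (h : ∀ y ∈ l, y = last) : lrC last l = l.length := by
  unfold lrC
  rw [List.takeWhile_eq_self_iff.mpr (by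
    intro x hx
    have := h x (List.mem_reverse.mp hx)
    simp [this])]
  simp

theorem lrN_eq (l : List String) (last : String) (h : l.getLast? = some last) :
    lrN l = lrC last l := by
  unfold lrN; rw [h]

-- prepending s to a nonempty list: split on whether the whole list is one run
theorem lrN_cons_of_all (s x : String) (r : List String) (last : String)
    (hlast : (x :: r).getLast? = some last)
    (hall : ∀ y ∈ x :: r, y = last) :
    lrN (s :: x :: r) = (x :: r).length + (if s = last then 1 else 0) := by
  rw [lrN_eq (s :: x :: r) last (by rw [List.getLast?_cons_cons, hlast])]
  unfold lrC
  rw [List.reverse_cons, takeWhile_append_all _ _ _ (by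
    intro y hy
    have := hall y (List.mem_reverse.mp hy)
    simp [this])]
  by_cases hs : s = last <;> simp [hs]

theorem lrN_cons_of_not_all (s x : String) (r : List String) (last : String)
    (hlast : (x :: r).getLast? = some last)
    (hnall : ¬ ∀ y ∈ x :: r, y = last) :
    lrN (s :: x :: r) = lrN (x :: r) := by
  rw [lrN_eq (s :: x :: r) last (by rw [List.getLast?_cons_cons, hlast]),
      lrN_eq (x :: r) last hlast]
  unfold lrC
  rw [List.reverse_cons, takeWhile_append_not_all _ _ _ (by
    intro hall
    exact hnall (by
      intro y hy
      have := hall y (List.mem_reverse.mpr hy)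
      simpa using this))]

theorem getLast_mem_all (x : String) (r : List String) (last : String)
    (hlast : (x :: r).getLast? = some last) (h : ∀ y ∈ r, y = x) :
    ∀ y ∈ x :: r, y = last := by
  have hmem : last ∈ x :: r := List.mem_of_getLast? hlast
  have hlx : last = x := by
    rcases List.mem_cons.mp hmem with hc | hc
    · exact hc
    · exact h last hc
  intro y hy
  rcases List.mem_cons.mp hy with hc | hc
  · rw [hc, hlx]
  · rw [h y hc, hlx]

-- N1: a switch at the front leaves the final run unchanged
theorem lrN_cons_ne (s x : String) (r : List String) (hne : s ≠ x) :
    lrN (s :: x :: r) = lrN (x :: r) := by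
  cases hlast : (x :: r).getLast? with
  | none => exact absurd hlast (by simp [List.getLast?_eq_none_iff])
  | some last =>
    by_cases hall : ∀ y ∈ x :: r, y = last
    · have hx : x = last := hall x (by simp)
      rw [lrN_cons_of_all s x r last hlast hall]
      rw [if_neg (hx ▸ hne)]
      rw [lrN_eq (x :: r) last hlast, lrC_all last _ hall]
      simp
    · exact lrN_cons_of_not_all s x r last hlast hall

-- N2: extending the single run at the front lengthens the final run by one
theorem lrN_cons_eq_zero (x : String) (r : List String) (hz : swC (x :: r) = 0) :
    lrN (x :: x :: r) = lrN (x :: r) + 1 := by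
  have hr := (swC_zero_iff x r).mp hz
  cases hlast : (x :: r).getLast? with
  | none => exact absurd hlast (by simp [List.getLast?_eq_none_iff])
  | some last =>
    have hall := getLast_mem_all x r last hlast hr
    have hx : x = last := hall x (by simp)
    rw [lrN_cons_of_all x x r last hlast hall, if_pos hx]
    rw [lrN_eq (x :: r) last hlast, lrC_all last _ hall]

-- N3: with a switch somewhere, prepending a copy of the head leaves the final run unchanged
theorem lrN_cons_eq_pos (x : String) (r : List String) (hz : swC (x :: r) ≠ 0) :
    lrN (x :: x :: r) = lrN (x :: r) := by
  cases hlast : (x :: r).getLast? with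
  | none => exact absurd hlast (by simp [List.getLast?_eq_none_iff])
  | some last =>
    apply lrN_cons_of_not_all x x r last hlast
    intro hall
    apply hz
    apply (swC_zero_iff x r).mpr
    intro y hy
    have hx : x = last := hall x (by simp)
    exact (hall y (by simp [hy])).trans hx.symm

theorem lrN_single (s : String) : lrN [s] = 1 := by
  simp [lrN, lrC, List.takeWhile]

-- main invariant for A's loop (change = 0 throughout, as in A)
theorem loopA_formula (l : List String) : ∀ (s : String) (t c : Int),
    weldLoopA s t c 0 l =
      t + 1800 * (swC (s :: l) : Int) + 80 * (lrN (s :: l) : Int)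
        - (if swC (s :: l) = 0 then 80 else 80 * c) := by
  induction l with
  | nil =>
    intro s t c
    simp [weldLoopA, swC_single, lrN_single]
  | cons x r ih =>
    intro s t c
    by_cases hsx : s = x
    · subst hsx
      rw [show weldLoopA s t c 0 (s :: r) = weldLoopA s (t + 80) (c + 1) 0 r from by
        simp [weldLoopA]]
      rw [ih s (t + 80) (c + 1)]
      rw [swC_cons_cons s s r, if_pos rfl, Nat.zero_add]
      by_cases hz : swC (s :: r) = 0
      · rw [lrN_cons_eq_zero s r hz, if_pos hz, if_pos hz]
        push_cast; ring
      · rw [lrN_cons_eq_pos s r hz, if_neg hz, if_neg hz]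
        ring
    · rw [show weldLoopA s t c 0 (x :: r) = weldLoopA x (t + 80 + 1800 - 80 * c) 1 0 r from by
        simp [weldLoopA, hsx]]
      rw [ih x (t + 80 + 1800 - 80 * c) 1]
      rw [swC_cons_cons s x r, if_neg hsx]
      rw [lrN_cons_ne s x r hsx]
      rw [if_neg (by omega : ¬(1 + swC (x :: r) = 0))]
      rw [show (if swC (x :: r) = 0 then (80 : Int) else 80 * 1) = 80 from by
        split_ifs <;> ring]
      push_cast; ring

-- ===== VERDICT (by name: the statement is the Claim_ definition above) =====
theorem welding_loss_alt_closed (l : List String) (last : String)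
    (hlast : l.getLast? = some last) :
    welding_loss_alt l = 1800 * (swC l : Int) + 80 * (lrC last l : Int) := by
  unfold welding_loss_alt
  rw [hlast]
  rfl

theorem welding_loss_spec : Claim_equal_welding_loss := by
  unfold Claim_equal_welding_loss
  intro l _ hpre
  unfold Spec_welding_loss
  cases l with
  | nil => exact absurd rfl hpre
  | cons s0 rest =>
    cases hlast : (s0 :: rest).getLast? with
    | none => exact absurd hlast (by simp [List.getLast?_eq_none_iff])
    | some last =>
      rw [welding_loss_alt_closed (s0 :: rest) last hlast]
      show weldLoopA s0 0 0 0 (s0 :: rest) = _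
      rw [loopA_formula (s0 :: rest) s0 0 0]
      have hsw : swC (s0 :: s0 :: rest) = swC (s0 :: rest) := by
        rw [swC_cons_cons]; simp
      rw [← lrN_eq (s0 :: rest) last hlast]
      by_cases hz : swC (s0 :: rest) = 0
      · rw [lrN_cons_eq_zero s0 rest hz, hsw, if_pos hz, hz]
        push_cast; ring
      · rw [lrN_cons_eq_pos s0 rest hz, hsw, if_neg hz]
        push_cast; ring
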